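-- pv_equiv track=rewrite | github.com/lara20000113/usenix2026 | semantic.py | belong_sequence_downup
-- ===== SOURCE A (Python) =====
-- def belong_sequence_downup(string):
--     flag1 = True
--     ordList = [ord(c) for c in string]
--     for i in range(1, len(string)):
--         if ordList[i]-ordList[i-1] != 1:
--             flag1 = False
--     flag2 = True
--     for i in range(1, len(string)):
--         if ordList[i]-ordList[i-1] != -1:
--             flag2 = False
--     return (flag1 or flag2) and len(string)>=3
-- ===== SOURCE B (Python) =====
-- def belong_sequence_downup(string):
--     n = len(string)
--     if n < 3:
--         return False
--     ords = [ord(c) for c in string]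
--     base = ords[0]
--     return ords == list(range(base, base + n)) or ords == list(range(base, base - n, -1))
-- ===== Notes on version B (the rewrite author's own statement) =====
-- stated objective: alternative
-- what changed: Instead of scanning adjacent differences into two flags over two index loops, B synthesizes the two candidate canonical sequences (ascending and descending ranges from the first code point) and compares the whole ord list against them after an early length<3 return; the constant-factor speedup comes from replacing the per-index Python-level loops with range materialization and list comparison done in C.
import Mathlib
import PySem

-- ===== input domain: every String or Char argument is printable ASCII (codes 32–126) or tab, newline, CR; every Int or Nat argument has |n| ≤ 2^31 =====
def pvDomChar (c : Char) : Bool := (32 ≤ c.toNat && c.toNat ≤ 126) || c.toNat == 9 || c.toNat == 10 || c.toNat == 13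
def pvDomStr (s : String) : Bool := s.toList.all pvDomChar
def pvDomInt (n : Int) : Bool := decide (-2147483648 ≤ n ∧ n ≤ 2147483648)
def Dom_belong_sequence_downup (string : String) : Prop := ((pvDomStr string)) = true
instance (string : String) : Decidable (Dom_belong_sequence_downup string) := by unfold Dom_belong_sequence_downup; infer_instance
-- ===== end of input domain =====

-- B replaces A's two adjacent-difference flag loops by constructing the ascending and
-- descending canonical ranges from the first code point and comparing whole lists (alternative decomposition).

-- ===== PORT A =====
def belong_sequence_downup (string : String) : Bool :=
  let ordList : List Int := string.toList.map (fun c => (c.toNat : Int))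
  let flag1 : Bool := (PySem.List.pyRange 1 (string.toList.length : Int) 1).foldl
      (fun acc i =>
        if PySem.List.pyGetD ordList i 0 - PySem.List.pyGetD ordList (i - 1) 0 ≠ 1 then false else acc) true
  let flag2 : Bool := (PySem.List.pyRange 1 (string.toList.length : Int) 1).foldl
      (fun acc i =>
        if PySem.List.pyGetD ordList i 0 - PySem.List.pyGetD ordList (i - 1) 0 ≠ -1 then false else acc) true
  (flag1 || flag2) && decide ((3 : Int) ≤ (string.toList.length : Int))

-- ===== PORT B =====
def belong_sequence_downup_alt (string : String) : Bool :=
  let n : Int := string.toList.length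
  if n < 3 then false
  else
    let ords : List Int := string.toList.map (fun c => (c.toNat : Int))
    let base : Int := PySem.List.pyGetD ords 0 0
    (ords == PySem.List.pyRange base (base + n) 1) || (ords == PySem.List.pyRange base (base - n) (-1))

-- ===== PRECONDITION & SPEC =====
def Spec_belong_sequence_downup (string : String) (out : Bool) : Prop := out = belong_sequence_downup_alt string
instance (string : String) (out : Bool) : Decidable (Spec_belong_sequence_downup string out) := by unfold Spec_belong_sequence_downup; infer_instance

-- ===== CLAIM (what is proved, stated in full; the proofs are below) =====
def Claim_equal_belong_sequence_downup : Prop := ∀ (string : String), Dom_belong_sequence_downup string → Spec_belong_sequence_downup string (belong_sequence_downup string)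

-- ===== LEMMAS AND PROOFS =====

-- the adjacent-difference property, Nat-indexed
def DiffsOK (l : List Int) (d : Int) : Prop :=
  ∀ k : Nat, k + 1 < l.length → l.getD (k + 1) 0 - l.getD k 0 = d

-- A's flag-setting foldl is an 'all'
theorem foldl_flag (P : Int → Prop) [DecidablePred P] (xs : List Int) (b : Bool) :
    xs.foldl (fun acc i => if P i then false else acc) b
      = (b && xs.all (fun i => decide (¬ P i))) := by
  induction xs generalizing b with
  | nil => simp
  | cons a t ih =>
      simp only [List.foldl_cons, List.all_cons, ih]
      by_cases h : P a <;> simp [h]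

theorem getD_of_diffs (l : List Int) (d : Int) (h : DiffsOK l d) :
    ∀ k : Nat, k < l.length → l.getD k 0 = l.getD 0 0 + d * k := by
  intro k
  induction k with
  | zero => intro _; simp
  | succ k ih =>
      intro hk
      have h1 := h k hk
      have h2 := ih (by omega)
      have : l.getD (k + 1) 0 = l.getD k 0 + d := by omega
      rw [this, h2]; push_cast; ring

theorem asc_eq (l : List Int) (h : DiffsOK l 1) :
    l = PySem.List.pyRange (l.getD 0 0) (l.getD 0 0 + l.length) 1 := by
  have hp := getD_of_diffs l 1 h
  apply List.ext_getElem
  · rw [PySem.List.length_pyRange_one]; omega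
  · intro k h1 h2
    have hx := hp k h1
    rw [List.getD_eq_getElem l 0 h1] at hx
    rw [PySem.List.getElem_pyRange_one]
    rw [hx]; ring

theorem desc_eq (l : List Int) (h : DiffsOK l (-1)) :
    l = PySem.List.pyRange (l.getD 0 0) (l.getD 0 0 - l.length) (-1) := by
  have hp := getD_of_diffs l (-1) h
  rw [PySem.List.pyRange_neg_one]
  apply List.ext_getElem
  · simp
  · intro k h1 h2
    have hx := hp k h1
    rw [List.getD_eq_getElem l 0 h1] at hx
    simp only [List.getElem_map, List.getElem_range]
    rw [hx]; ring

theorem diffs_pyRange_one (a b : Int) : DiffsOK (PySem.List.pyRange a b 1) 1 := by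
  intro k hk
  have hk' := hk
  rw [PySem.List.length_pyRange_one] at hk'
  rw [List.getD_eq_getElem _ 0 hk,
      List.getD_eq_getElem _ 0 (by omega),
      PySem.List.getElem_pyRange_one, PySem.List.getElem_pyRange_one]
  push_cast
  ring

theorem diffs_pyRange_neg_one (a b : Int) : DiffsOK (PySem.List.pyRange a b (-1)) (-1) := by
  rw [PySem.List.pyRange_neg_one]
  intro k hk
  rw [List.getD_eq_getElem _ 0 hk,
      List.getD_eq_getElem _ 0 (by omega)]
  simp only [List.getElem_map, List.getElem_range]
  push_cast; ring

-- A's flag (for difference d) holds iff DiffsOK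
theorem flag_iff (l : List Int) (d : Int) :
    ((PySem.List.pyRange 1 (l.length : Int) 1).foldl
        (fun acc i =>
          if PySem.List.pyGetD l i 0 - PySem.List.pyGetD l (i - 1) 0 ≠ d then false else acc) true
      = true) ↔ DiffsOK l d := by
  rw [foldl_flag (fun i => PySem.List.pyGetD l i 0 - PySem.List.pyGetD l (i - 1) 0 ≠ d)]
  simp only [Bool.true_and, List.all_eq_true, PySem.List.mem_pyRange_one,
    decide_eq_true_eq, not_not]
  constructor
  · intro h k hk
    have hi := h ((k : Int) + 1) ⟨by omega, by exact_mod_cast (by omega : ((k : Nat) + 1 : Int) < (l.length : Int))⟩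
    rw [PySem.List.pyGetD_eq_getElem l (i := (k : Int) + 1) 0 (by omega) (by omega)] at hi
    rw [PySem.List.pyGetD_eq_getElem l (i := (k : Int) + 1 - 1) 0 (by omega) (by omega)] at hi
    have e1 : ((k : Int) + 1).toNat = k + 1 := by omega
    have e2 : ((k : Int) + 1 - 1).toNat = k := by omega
    simp only [e1, e2] at hi
    rw [List.getD_eq_getElem l 0 hk, List.getD_eq_getElem l 0 (by omega)]
    exact hi
  · rintro h i ⟨h1, h2⟩
    have hi := h (i.toNat - 1) (by omega)
    rw [List.getD_eq_getElem l 0 (by omega), List.getD_eq_getElem l 0 (by omega)] at hi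
    rw [PySem.List.pyGetD_eq_getElem l (i := i) 0 (by omega) h2]
    rw [PySem.List.pyGetD_eq_getElem l (i := i - 1) 0 (by omega) (by omega)]
    have e1 : i.toNat = i.toNat - 1 + 1 := by omega
    have e2 : (i - 1).toNat = i.toNat - 1 := by omega
    simp only [e2]
    rw [show l[i.toNat] = l[i.toNat - 1 + 1]'(by omega) from by congr 1]
    exact hi

-- ===== VERDICT (by name: the statement is the Claim_ definition above) =====
theorem belong_sequence_downup_spec : Claim_equal_belong_sequence_downup := by
  intro s _
  unfold Spec_belong_sequence_downup belong_sequence_downup belong_sequence_downup_alt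
  set l : List Int := s.toList.map (fun c => (c.toNat : Int)) with hl
  have hlen : l.length = s.toList.length := by simp [hl]
  rw [show ((s.toList.length : Int)) = (l.length : Int) by rw [hlen]]
  by_cases h3 : ((l.length : Int) < 3)
  · rw [if_pos h3]
    have hd : decide ((3 : Int) ≤ (l.length : Int)) = false := by simpa using h3
    rw [hd, Bool.and_false]
  · rw [if_neg h3]
    have hbase : PySem.List.pyGetD l 0 0 = l.getD 0 0 := PySem.List.pyGetD_zero l 0
    rw [Bool.eq_iff_iff]
    simp only [Bool.and_eq_true, Bool.or_eq_true, decide_eq_true_eq, beq_iff_eq]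
    constructor
    · rintro ⟨hfl, _⟩
      rcases hfl with hf | hf
      · left
        rw [hbase]
        exact asc_eq l ((flag_iff l 1).mp hf)
      · right
        rw [hbase]
        exact desc_eq l ((flag_iff l (-1)).mp hf)
    · intro hor
      refine ⟨?_, by omega⟩
      rcases hor with he | he
      · left
        rw [flag_iff]
        rw [hbase] at he
        rw [he]
        exact diffs_pyRange_one _ _
      · right
        rw [flag_iff]
        rw [hbase] at he
        rw [he]
        exact diffs_pyRange_neg_one _ _
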